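-- pv_equiv track=rewrite | github.com/woorud/Crawling | 짝지어 제거하기.py | solution
-- ===== SOURCE A (Python) =====
-- from collections import deque
--
-- def solution(s):
--     s = deque(list(s))
--     al = []
--     al.append(s.popleft())
--     while s:
--         if len(al) == 0 :
--             al.append(s.popleft())
--         elif al[-1] == s[0]:
--             al.pop()
--             s.popleft()
--         else:
--             al.append(s.popleft())
--
--     if len(al) != 0:
--         return 0
--     else:
--         return 1
-- ===== SOURCE B (Python) =====
-- def solution(s):
--     while True:
--         for i in range(len(s) - 1):
--             if s[i] == s[i + 1]:
--                 s = s[:i] + s[i + 2:]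
--                 break
--         else:
--             break
--     return 1 if s == "" else 0
-- ===== Notes on version B (the rewrite author's own statement) =====
-- stated objective: alternative
-- what changed: Replaced the one-pass deque+stack cancellation with repeated reduction: scan the current string for the first adjacent equal pair, delete it and rescan, until no pair remains; answer 1 iff the string emptied.
import Mathlib
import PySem

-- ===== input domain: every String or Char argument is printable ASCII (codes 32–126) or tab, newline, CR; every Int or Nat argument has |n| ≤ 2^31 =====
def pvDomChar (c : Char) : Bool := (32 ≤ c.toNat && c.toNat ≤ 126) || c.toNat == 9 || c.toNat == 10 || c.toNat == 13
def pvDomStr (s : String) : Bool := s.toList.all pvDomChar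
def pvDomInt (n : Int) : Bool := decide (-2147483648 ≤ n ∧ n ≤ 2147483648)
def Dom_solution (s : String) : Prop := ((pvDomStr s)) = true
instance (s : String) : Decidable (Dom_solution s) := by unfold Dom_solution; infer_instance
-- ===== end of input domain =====

-- B replaces A's single stack pass by repeated deletion of the first adjacent equal pair
-- until none remains (alternative algorithm, not faster).

-- ===== PORT A =====
-- one step of A's while-loop: al is the Python list `al` with its LAST element (al[-1]) at the head
def aStep (al : List Char) (c : Char) : List Char :=
  if al = [] then [c]
  else if al.head? = some c then al.tail
  else c :: al

def solution (s : String) : Int :=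
  match s.toList with
  | [] => 0   -- Python: s.popleft() on an empty deque raises IndexError; excluded by Pre_solution
  | c :: rest =>
    let al := List.foldl aStep [c] rest   -- al.append(first char), then the while-loop over the rest
    if al ≠ [] then 0 else 1

-- ===== PORT B =====
-- the for-loop of B: delete the first adjacent equal pair, if any (s[:i] + s[i+2:])
def reduceOnce : List Char → Option (List Char)
  | a :: b :: t => if a = b then some t else (reduceOnce (b :: t)).map (a :: ·)
  | _ => none

theorem reduceOnce_length : ∀ (l t : List Char), reduceOnce l = some t → t.length + 2 = l.length := by
  intro l
  induction l with
  | nil => intro t h; simp [reduceOnce] at h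
  | cons a rest ih =>
    intro t h
    match rest, h with
    | [], h => simp [reduceOnce] at h
    | b :: r, h =>
      by_cases hab : a = b
      · simp [reduceOnce, hab] at h; subst h; simp
      · simp only [reduceOnce, if_neg hab, Option.map_eq_some_iff] at h
        obtain ⟨u, hu, rfl⟩ := h
        have := ih u hu
        simp at this ⊢; omega

-- B's outer while-loop
def reduceFull (l : List Char) : List Char :=
  match h : reduceOnce l with
  | some t => reduceFull t
  | none => l
termination_by l.length
decreasing_by have := reduceOnce_length l t h; omega

def solution_alt (s : String) : Int :=
  if reduceFull s.toList = [] then 1 else 0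

-- ===== PRECONDITION & SPEC =====
-- A raises IndexError on the empty string (popleft on an empty deque); excluded.
def Pre_solution (s : String) : Prop := s ≠ ""
instance (s : String) : Decidable (Pre_solution s) := by unfold Pre_solution; infer_instance
def pvWitness_solution : String := "baab"

def Spec_solution (s : String) (out : Int) : Prop := out = solution_alt s
instance (s : String) (out : Int) : Decidable (Spec_solution s out) := by unfold Spec_solution; infer_instance

-- ===== CLAIM (what is proved, stated in full; the proofs are below) =====
def Claim_equal_solution : Prop := ∀ (s : String), Dom_solution s → Pre_solution s → Spec_solution s (solution s)

-- ===== LEMMAS AND PROOFS =====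

-- equation lemmas for the well-founded reduceFull
theorem reduceFull_some {l t : List Char} (h : reduceOnce l = some t) :
    reduceFull l = reduceFull t := by
  rw [reduceFull]; split <;> simp_all

theorem reduceFull_none {l : List Char} (h : reduceOnce l = none) :
    reduceFull l = l := by
  rw [reduceFull]; split <;> simp_all

-- A's stack step in head?-form
theorem aStep_eq (al : List Char) (c : Char) :
    aStep al c = if al.head? = some c then al.tail else c :: al := by
  cases al <;> simp [aStep]

-- the stack never carries two equal adjacent elements
theorem aStep_chain {al : List Char} (h : List.IsChain (· ≠ ·) al) (c : Char) :
    List.IsChain (· ≠ ·) (aStep al c) := by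
  rw [aStep_eq]
  cases al with
  | nil => simpa using List.isChain_singleton (R := (· ≠ ·)) c
  | cons a t =>
    by_cases hac : a = c
    · simp [hac]; exact h.tail
    · rw [if_neg (show ¬((a :: t).head? = some c) by
        simp only [List.head?_cons, Option.some.injEq]; exact hac)]
      rw [List.isChain_cons]
      refine ⟨?_, h⟩
      intro y hy
      simp at hy; subst hy
      exact fun h' => hac h'.symm

-- two equal chars in a row cancel on a chain stack
theorem aStep_twice {al : List Char} (h : List.IsChain (· ≠ ·) al) (a : Char) :
    aStep (aStep al a) a = al := by
  cases al with
  | nil => simp [aStep]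
  | cons b t =>
    by_cases hba : b = a
    · subst hba
      have hin : aStep (b :: t) b = t := by
        rw [aStep_eq]; simp
      rw [hin]
      cases t with
      | nil => simp [aStep]
      | cons b' t' =>
        rw [List.isChain_cons] at h
        have hbb' : b ≠ b' := h.1 b' rfl
        rw [aStep_eq, if_neg (show ¬((b' :: t').head? = some b) by
          simp only [List.head?_cons, Option.some.injEq]; exact fun h' => hbb' h'.symm)]
    · have hin : aStep (b :: t) a = a :: b :: t := by
        rw [aStep_eq, if_neg (show ¬((b :: t).head? = some a) by
          simp only [List.head?_cons, Option.some.injEq]; exact hba)]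
      rw [hin, aStep_eq]; simp

-- deleting the first adjacent pair does not change the stack result
theorem foldl_reduceOnce : ∀ (l t al : List Char), List.IsChain (· ≠ ·) al →
    reduceOnce l = some t → List.foldl aStep al l = List.foldl aStep al t := by
  intro l
  induction l with
  | nil => intro t al _ h; simp [reduceOnce] at h
  | cons a rest ih =>
    intro t al hal h
    match rest, h with
    | [], h => simp [reduceOnce] at h
    | b :: r, h =>
      by_cases hab : a = b
      · subst hab
        simp [reduceOnce] at h
        subst h
        simp only [List.foldl_cons]
        rw [aStep_twice hal]
      · simp only [reduceOnce, if_neg hab, Option.map_eq_some_iff] at h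
        obtain ⟨u, hu, rfl⟩ := h
        simp only [List.foldl_cons]
        exact ih u (aStep al a) (aStep_chain hal a) hu

-- when no pair is deletable, the string has no adjacent equal chars
theorem reduceOnce_none_chain : ∀ (l : List Char), reduceOnce l = none → List.IsChain (· ≠ ·) l := by
  intro l
  induction l with
  | nil => intro _; exact List.isChain_nil
  | cons a rest ih =>
    intro h
    match rest with
    | [] => exact List.isChain_singleton (R := (· ≠ ·)) a
    | b :: r =>
      by_cases hab : a = b
      · simp [reduceOnce, hab] at h
      · simp only [reduceOnce, if_neg hab, Option.map_eq_none_iff] at h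
        rw [List.isChain_cons]
        exact ⟨fun y hy => by simp at hy; subst hy; exact hab, ih h⟩

-- a pair-free string passes through the stack untouched
theorem foldl_chain_reverse : ∀ (l al : List Char), List.IsChain (· ≠ ·) l →
    List.IsChain (· ≠ ·) al → (∀ a b, l.head? = some a → al.head? = some b → a ≠ b) →
    List.foldl aStep al l = l.reverse ++ al := by
  intro l
  induction l with
  | nil => intro al _ _ _; simp
  | cons c rest ih =>
    intro al hl hal hj
    have hstep : aStep al c = c :: al := by
      rw [aStep_eq]
      cases al with
      | nil => simp
      | cons b t =>
        have hcb : c ≠ b := hj c b rfl rfl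
        rw [if_neg (show ¬((b :: t).head? = some c) by
          simp only [List.head?_cons, Option.some.injEq]; exact fun h' => hcb h'.symm)]
    simp only [List.foldl_cons, hstep]
    have hcchain : List.IsChain (· ≠ ·) (c :: al) := by
      rw [List.isChain_cons]
      refine ⟨?_, hal⟩
      intro y hy
      cases al with
      | nil => simp at hy
      | cons b t =>
        simp at hy; subst hy
        exact hj c b rfl rfl
    have hjunc : ∀ a b, rest.head? = some a → (c :: al).head? = some b → a ≠ b := by
      intro a b ha hb
      simp at hb; subst hb
      cases rest with
      | nil => simp at ha
      | cons a' r =>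
        simp at ha; subst ha
        rw [List.isChain_cons] at hl
        first
        | exact fun h' => (hl.1 a rfl) h'.symm
        | exact fun h' => (hl.1 a' rfl) h'.symm
    rw [ih (c :: al) hl.tail hcchain hjunc]
    simp

theorem foldl_reduceFull : ∀ (l : List Char), List.foldl aStep [] l = (reduceFull l).reverse := by
  intro l
  induction l using reduceFull.induct with
  | case1 l t h ih =>
    rw [foldl_reduceOnce l t [] List.isChain_nil h, ih, reduceFull_some h]
  | case2 l h =>
    rw [reduceFull_none h,
      foldl_chain_reverse l [] (reduceOnce_none_chain l h) List.isChain_nil (by simp)]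
    simp

-- ===== VERDICT (by name: the statement is the Claim_ definition above) =====
theorem solution_spec : Claim_equal_solution := by
  intro s _ hpre
  unfold Spec_solution solution solution_alt
  have hne : s.toList ≠ [] := fun h => hpre (String.toList_eq_nil_iff.mp h)
  match hs : s.toList with
  | [] => exact absurd hs hne
  | c :: rest =>
    have h1 : List.foldl aStep [c] rest = (reduceFull (c :: rest)).reverse := by
      have := foldl_reduceFull (c :: rest)
      simpa [aStep] using this
    simp only [h1]
    by_cases h : reduceFull (c :: rest) = []
    · simp [h]
    · simp [h, List.reverse_eq_nil_iff]
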